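-- pv_equiv track=rewrite | github.com/PauloHenriqueRod/TREINO-MARATONA-PROGAMACAO | segmente-tree/questoes-extras/red_prog/Fishing.py | solve
-- ===== SOURCE A (Python) =====
-- def range_x(x1,s):
--     return x1+s
--
-- def range_y(y1,s):
--     return y1+s
--
-- def solve(s, cords, xis, yps):
--     max = 0
--     for x in range(xis):
--         rangedox = range_x(x1=x, s=s)
--         for y in range(yps):
--             rangedoy = range_y(y1=y, s=s)
--             aux = 0
--             for a in cords:
--                 if (x <= a[0] <= rangedox) and (y <= a[1] <=rangedoy):
--                     aux+=1
--             if aux > max: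
--                 max = aux
--     return max
-- ===== SOURCE B (Python) =====
-- def solve(s, cords, xis, yps):
--     # row sweep with a 1D difference array over y instead of counting every cell
--     if xis <= 0 or yps <= 0:
--         return 0
--     best = 0
--     for x in range(xis):
--         ydiff = {}
--         for a in cords:
--             if x <= a[0] <= x + s:
--                 y1 = max(0, a[1] - s)
--                 y2 = min(yps - 1, a[1])
--                 if y1 <= y2:
--                     ydiff[y1] = ydiff.get(y1, 0) + 1
--                     ydiff[y2 + 1] = ydiff.get(y2 + 1, 0) - 1
--         cur = 0
--         for y in range(yps):
--             cur += ydiff.get(y, 0)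
--             if cur > best:
--                 best = cur
--     return best
-- ===== Notes on version B (the rewrite author's own statement) =====
-- stated objective: faster
-- what changed: Replaces the per-cell brute-force recount (for every grid cell scan all points) by a row sweep that builds a 1D difference array over y from the points matching the row and takes the running prefix sum, removing the yps*n inner product.
import Mathlib
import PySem

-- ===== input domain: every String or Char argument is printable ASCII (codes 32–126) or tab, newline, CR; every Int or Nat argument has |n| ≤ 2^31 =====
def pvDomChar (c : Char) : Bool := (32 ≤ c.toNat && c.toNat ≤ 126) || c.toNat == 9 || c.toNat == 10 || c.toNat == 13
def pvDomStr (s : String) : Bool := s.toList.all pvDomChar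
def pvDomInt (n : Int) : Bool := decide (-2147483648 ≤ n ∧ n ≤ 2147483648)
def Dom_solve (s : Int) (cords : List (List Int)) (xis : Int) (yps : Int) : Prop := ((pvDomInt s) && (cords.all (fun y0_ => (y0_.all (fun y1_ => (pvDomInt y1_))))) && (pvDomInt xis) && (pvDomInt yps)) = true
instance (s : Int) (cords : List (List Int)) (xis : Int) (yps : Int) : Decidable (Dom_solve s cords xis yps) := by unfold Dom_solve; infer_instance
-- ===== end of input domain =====

-- B replaces A's per-cell brute-force recount by a row sweep with a 1D difference
-- array over y (deltas from the row's matching points, then a prefix-sum/max scan).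

-- ===== PORT A =====
def range_x (x1 : Int) (s : Int) : Int := x1 + s

def range_y (y1 : Int) (s : Int) : Int := y1 + s

def solve (s : Int) (cords : List (List Int)) (xis : Int) (yps : Int) : Int :=
  (PySem.List.pyRange 0 xis 1).foldl (fun mx x =>
    let rangedox := range_x x s
    (PySem.List.pyRange 0 yps 1).foldl (fun mx y =>
      let rangedoy := range_y y s
      let aux := cords.foldl (fun aux a =>
        if x ≤ PySem.List.pyGetD a 0 0 ∧ PySem.List.pyGetD a 0 0 ≤ rangedox ∧
           y ≤ PySem.List.pyGetD a 1 0 ∧ PySem.List.pyGetD a 1 0 ≤ rangedoy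
        then aux + 1 else aux) 0
      if aux > mx then aux else mx) mx) 0

-- ===== PORT B =====
-- one step of the loop filling the difference dict ('if x <= a[0] <= x+s: …')
def bstep (s : Int) (yps : Int) (x : Int) (d : PySem.Dict Int Int) (a : List Int) : PySem.Dict Int Int :=
  if x ≤ PySem.List.pyGetD a 0 0 ∧ PySem.List.pyGetD a 0 0 ≤ x + s then
    let y1 := max 0 (PySem.List.pyGetD a 1 0 - s)
    let y2 := min (yps - 1) (PySem.List.pyGetD a 1 0)
    if y1 ≤ y2 then
      let d1 := d.insert y1 (d.getD y1 0 + 1)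
      d1.insert (y2 + 1) (d1.getD (y2 + 1) 0 - 1)
    else d
  else d

-- the difference dict 'ydiff' built for row x
def bDiff (s : Int) (yps : Int) (x : Int) (cords : List (List Int)) : PySem.Dict Int Int :=
  cords.foldl (bstep s yps x) PySem.Dict.empty

def solve_alt (s : Int) (cords : List (List Int)) (xis : Int) (yps : Int) : Int :=
  if xis ≤ 0 ∨ yps ≤ 0 then 0
  else
    (PySem.List.pyRange 0 xis 1).foldl (fun best x =>
      let ydiff := bDiff s yps x cords
      ((PySem.List.pyRange 0 yps 1).foldl (fun st y =>
        let cur := st.1 + ydiff.getD y 0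
        (cur, if cur > st.2 then cur else st.2)) ((0 : Int), best)).2) 0

-- ===== PRECONDITION & SPEC =====
-- Pre_ excludes exactly the inputs on which the Python A raises IndexError: when both
-- loops run, a coordinate row that is empty (a[0] fails), or a single-element row whose
-- x-interval contains some visited x, so that a[1] gets evaluated.
def Pre_solve (s : Int) (cords : List (List Int)) (xis : Int) (yps : Int) : Prop :=
  0 < xis → 0 < yps → ∀ a ∈ cords, a ≠ [] ∧
    (a.length = 1 → min (a.headD 0) (xis - 1) < max 0 (a.headD 0 - s))
instance (s : Int) (cords : List (List Int)) (xis : Int) (yps : Int) : Decidable (Pre_solve s cords xis yps) := by unfold Pre_solve; infer_instance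

def pvWitness_solve : Int × List (List Int) × Int × Int := (1, [[0, 0], [2, 1]], 3, 3)

def Spec_solve (s : Int) (cords : List (List Int)) (xis : Int) (yps : Int) (out : Int) : Prop := out = solve_alt s cords xis yps
instance (s : Int) (cords : List (List Int)) (xis : Int) (yps : Int) (out : Int) : Decidable (Spec_solve s cords xis yps out) := by unfold Spec_solve; infer_instance

-- ===== CLAIM (what is proved, stated in full; the proofs are below) =====
def Claim_equal_solve : Prop := ∀ (s : Int) (cords : List (List Int)) (xis : Int) (yps : Int), Dom_solve s cords xis yps → Pre_solve s cords xis yps → Spec_solve s cords xis yps (solve s cords xis yps)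

-- ===== LEMMAS AND PROOFS =====

-- the contribution a single point leaves in the difference dict at key k
def delta (s : Int) (yps : Int) (x : Int) (a : List Int) (k : Int) : Int :=
  if x ≤ PySem.List.pyGetD a 0 0 ∧ PySem.List.pyGetD a 0 0 ≤ x + s ∧
     max 0 (PySem.List.pyGetD a 1 0 - s) ≤ min (yps - 1) (PySem.List.pyGetD a 1 0) then
    (if k = max 0 (PySem.List.pyGetD a 1 0 - s) then 1 else 0) +
    (if k = min (yps - 1) (PySem.List.pyGetD a 1 0) + 1 then -1 else 0)
  else 0

lemma getD_bstep (s yps x : Int) (d : PySem.Dict Int Int) (a : List Int) (k : Int) :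
    (bstep s yps x d a).getD k 0 = d.getD k 0 + delta s yps x a k := by
  unfold bstep delta
  dsimp only
  split_ifs with h1 h2 h3 h4 h5 h6 h7 h8 <;>
    simp_all [PySem.Dict.getD_insert] <;> omega

lemma getD_foldl_bstep (s yps x : Int) (l : List (List Int)) (d : PySem.Dict Int Int) (k : Int) :
    (l.foldl (bstep s yps x) d).getD k 0
      = d.getD k 0 + (l.map (fun a => delta s yps x a k)).sum := by
  induction l generalizing d with
  | nil => simp
  | cons a t ih =>
    simp only [List.foldl_cons, List.map_cons, List.sum_cons]
    rw [ih, getD_bstep]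
    ring

lemma getD_bDiff (s yps x : Int) (cords : List (List Int)) (k : Int) :
    (bDiff s yps x cords).getD k 0 = (cords.map (fun a => delta s yps x a k)).sum := by
  unfold bDiff
  rw [getD_foldl_bstep]
  simp

lemma sum_map_add' (l : List ℕ) (f g : ℕ → Int) :
    (l.map (fun k => f k + g k)).sum = (l.map f).sum + (l.map g).sum := by
  induction l with
  | nil => simp
  | cons h t ih => simp [ih]; ring

lemma sum_ind (n : ℕ) (t c : Int) :
    ((List.range n).map (fun (k : ℕ) => if (k : Int) = t then c else 0)).sum
      = if 0 ≤ t ∧ t < (n : Int) then c else 0 := by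
  induction n with
  | zero =>
    simp only [List.range_zero, List.map_nil, List.sum_nil, Nat.cast_zero]
    rw [if_neg (by omega)]
  | succ n ih =>
    rw [List.range_succ, List.map_append, List.sum_append, ih]
    simp only [List.map_cons, List.map_nil, List.sum_cons, List.sum_nil, add_zero]
    split_ifs <;> omega

lemma sum_swap (l : List (List Int)) (m : ℕ) (f : List Int → ℕ → Int) :
    ((List.range m).map (fun (k : ℕ) => (l.map (fun a => f a k)).sum)).sum
      = (l.map (fun a => ((List.range m).map (f a)).sum)).sum := by
  induction l with
  | nil => simp
  | cons a t ih =>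
    simp only [List.map_cons, List.sum_cons]
    rw [sum_map_add' (List.range m) (fun k => f a k) (fun k => (t.map (fun a' => f a' k)).sum), ih]

lemma sum_delta_single (s yps x y : Int) (a : List Int) (h0 : 0 ≤ y) (h1 : y < yps) :
    ((List.range (y + 1).toNat).map (fun (k : ℕ) => delta s yps x a (k : Int))).sum
      = if x ≤ PySem.List.pyGetD a 0 0 ∧ PySem.List.pyGetD a 0 0 ≤ x + s ∧
           y ≤ PySem.List.pyGetD a 1 0 ∧ PySem.List.pyGetD a 1 0 ≤ y + s
        then 1 else 0 := by
  unfold delta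
  by_cases hc : x ≤ PySem.List.pyGetD a 0 0 ∧ PySem.List.pyGetD a 0 0 ≤ x + s ∧
      max 0 (PySem.List.pyGetD a 1 0 - s) ≤ min (yps - 1) (PySem.List.pyGetD a 1 0)
  · simp only [if_pos hc]
    rw [sum_map_add' (List.range (y + 1).toNat)
        (fun (k : ℕ) => if (k : Int) = max 0 (PySem.List.pyGetD a 1 0 - s) then 1 else 0)
        (fun (k : ℕ) => if (k : Int) = min (yps - 1) (PySem.List.pyGetD a 1 0) + 1 then -1 else 0),
      sum_ind, sum_ind]
    have hm : (((y + 1).toNat : ℕ) : Int) = y + 1 := by omega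
    rw [hm]
    split_ifs <;> omega
  · simp only [if_neg hc]
    simp only [List.map_const', List.sum_replicate, smul_zero]
    rw [if_neg (by omega)]

lemma sum_ite_eq_foldl (l : List (List Int)) (p : List Int → Prop) [DecidablePred p] (init : Int) :
    init + (l.map (fun a => if p a then (1 : Int) else 0)).sum
      = l.foldl (fun acc a => if p a then acc + 1 else acc) init := by
  induction l generalizing init with
  | nil => simp
  | cons a t ih =>
    simp only [List.map_cons, List.sum_cons, List.foldl_cons]
    by_cases hp : p a
    · rw [if_pos hp, if_pos hp, ← ih]; ring
    · rw [if_neg hp, if_neg hp, ← ih]; ring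

-- the prefix-sum/max scan over a row equals the max scan of the cell counts
lemma scan (g cnt : Int → Int) (n : ℕ) (b : Int)
    (h : ∀ y : Int, 0 ≤ y → y < (n : Int) →
      ((List.range (y + 1).toNat).map (fun (k : ℕ) => g (k : Int))).sum = cnt y) :
    ((PySem.List.pyRange 0 (n : Int) 1).foldl
        (fun st y => (st.1 + g y, if st.1 + g y > st.2 then st.1 + g y else st.2)) ((0 : Int), b))
      = (((List.range n).map (fun (k : ℕ) => g (k : Int))).sum,
         (PySem.List.pyRange 0 (n : Int) 1).foldl (fun mx y => if cnt y > mx then cnt y else mx) b) := by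
  induction n with
  | zero => simp [PySem.List.pyRange_one_eq_nil]
  | succ n ih =>
    have hcast : ((n + 1 : ℕ) : Int) = (n : Int) + 1 := by push_cast; ring
    rw [hcast, PySem.List.pyRange_one_succ_right (by exact_mod_cast n.zero_le),
      List.foldl_append, List.foldl_append,
      ih (fun y h0 h1 => h y h0 (by omega))]
    simp only [List.foldl_cons, List.foldl_nil]
    have hS : ((List.range (n + 1)).map (fun (k : ℕ) => g (k : Int))).sum
        = ((List.range n).map (fun (k : ℕ) => g (k : Int))).sum + g (n : Int) := by
      rw [List.range_succ]; simp
    have hcnt : cnt (n : Int) = ((List.range n).map (fun (k : ℕ) => g (k : Int))).sum + g (n : Int) := by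
      rw [← hS, ← h (n : Int) (by omega) (by omega)]
      congr 1
    rw [hS, hcnt]

lemma main_eq (s : Int) (cords : List (List Int)) (xis yps : Int) :
    solve s cords xis yps = solve_alt s cords xis yps := by
  unfold solve solve_alt
  by_cases hx : xis ≤ 0 ∨ yps ≤ 0
  · rw [if_pos hx]
    rcases hx with h | h
    · rw [PySem.List.pyRange_one_eq_nil h]; rfl
    · rw [PySem.List.pyRange_one_eq_nil h]
      simp only [List.foldl_nil]
      exact PySem.List.foldl_ignore _ _
  · rw [if_neg hx]
    push_neg at hx
    obtain ⟨hx0, hy0⟩ := hx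
    apply PySem.List.foldl_congr_mem
    intro best x _
    lift yps to ℕ using (by omega : (0:Int) ≤ yps) with n hn
    have h : ∀ y : Int, 0 ≤ y → y < (n : Int) →
        ((List.range (y + 1).toNat).map (fun (k : ℕ) => (bDiff s (n : Int) x cords).getD (k : Int) 0)).sum
          = cords.foldl (fun aux a =>
              if x ≤ PySem.List.pyGetD a 0 0 ∧ PySem.List.pyGetD a 0 0 ≤ x + s ∧
                 y ≤ PySem.List.pyGetD a 1 0 ∧ PySem.List.pyGetD a 1 0 ≤ y + s
              then aux + 1 else aux) 0 := by
      intro y h0 h1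
      calc ((List.range (y + 1).toNat).map (fun (k : ℕ) => (bDiff s (n : Int) x cords).getD (k : Int) 0)).sum
          = ((List.range (y + 1).toNat).map
              (fun (k : ℕ) => (cords.map (fun a => delta s (n : Int) x a (k : Int))).sum)).sum := by
            simp only [getD_bDiff]
        _ = (cords.map (fun a =>
              ((List.range (y + 1).toNat).map (fun (k : ℕ) => delta s (n : Int) x a (k : Int))).sum)).sum :=
            sum_swap cords (y + 1).toNat (fun a k => delta s (n : Int) x a (k : Int))
        _ = (cords.map (fun a =>
              if x ≤ PySem.List.pyGetD a 0 0 ∧ PySem.List.pyGetD a 0 0 ≤ x + s ∧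
                 y ≤ PySem.List.pyGetD a 1 0 ∧ PySem.List.pyGetD a 1 0 ≤ y + s
              then (1 : Int) else 0)).sum := by
            exact congrArg List.sum (List.map_congr_left
              (fun a _ => sum_delta_single s (n : Int) x y a h0 h1))
        _ = cords.foldl (fun aux a =>
              if x ≤ PySem.List.pyGetD a 0 0 ∧ PySem.List.pyGetD a 0 0 ≤ x + s ∧
                 y ≤ PySem.List.pyGetD a 1 0 ∧ PySem.List.pyGetD a 1 0 ≤ y + s
              then aux + 1 else aux) 0 := by
            have := sum_ite_eq_foldl cords
              (fun a => x ≤ PySem.List.pyGetD a 0 0 ∧ PySem.List.pyGetD a 0 0 ≤ x + s ∧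
                 y ≤ PySem.List.pyGetD a 1 0 ∧ PySem.List.pyGetD a 1 0 ≤ y + s) 0
            simpa using this
    have hs := scan (fun k => (bDiff s (n : Int) x cords).getD k 0)
      (fun y => cords.foldl (fun aux a =>
          if x ≤ PySem.List.pyGetD a 0 0 ∧ PySem.List.pyGetD a 0 0 ≤ x + s ∧
             y ≤ PySem.List.pyGetD a 1 0 ∧ PySem.List.pyGetD a 1 0 ≤ y + s
          then aux + 1 else aux) 0) n best h
    exact (congrArg Prod.snd hs).symm

-- ===== VERDICT (by name: the statement is the Claim_ definition above) =====
theorem solve_spec : Claim_equal_solve := by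
  intro s cords xis yps _ _
  exact main_eq s cords xis yps
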